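-- pv_equiv track=rewrite | github.com/Javzaat/ai-lab2-3_games | xo_nxn_ai.py | lines_through_cell
-- ===== SOURCE A (Python) =====
-- def in_bounds(n, r, c):
--     """
--     (r, c) координат board-ийн хүрээнд багтаж байгаа эсэхийг шалгана.
--     """
--     return 0 <= r < n and 0 <= c < n
--
-- def lines_through_cell(n, r, c):
--     """
--     (r,c) нүдээр дайрч өнгөрөх бүх боломжит мөр/багана/диагональ шугамуудыг үүсгэнэ.
--     Энэ нь heuristic_move_score дээр ашиглагдаж,
--     тухайн нүүдэл нь хэдэн "боломжит ялалтын шугам" нээж байгааг тооцоолно.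
--
--     4 чиглэлээр бүрэн line үүсгэнэ:
--       - хэвтээ
--       - босоо
--       - диагональ
--       - эсрэг диагональ
--     """
--     dirs = [(0,1), (1,0), (1,1), (1,-1)]
--     for dr, dc in dirs:
--         # line-ийн эхлэл рүү ухрана
--         rr, cc = r, c
--         while in_bounds(n, rr - dr, cc - dc):
--             rr -= dr
--             cc -= dc
--
--         # одоо урагш бүх line-г цуглуулна
--         line = []
--         while in_bounds(n, rr, cc):
--             line.append((rr, cc))
--             rr += dr
--             cc += dc
--
--         yield line
-- ===== SOURCE B (Python) =====
-- def lines_through_cell(n, r, c):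
--     # A cell that is not on the board lies on no board line.
--     if not (0 <= r < n and 0 <= c < n):
--         for _ in range(4):
--             yield []
--         return
--     yield [(r, j) for j in range(n)]
--     yield [(i, c) for i in range(n)]
--     d = min(r, c)
--     yield [(r - d + t, c - d + t) for t in range(n - abs(r - c))]
--     a = min(r, n - 1 - c)
--     yield [(r - a + t, c + a - t) for t in range(n - abs(r + c - (n - 1)))]
-- ===== Notes on version B (the rewrite author's own statement) =====
-- stated objective: simpler
-- what changed: B replaces A's two sequential while-loops per direction (step backwards to the line start, then walk forwards collecting) by a guard on board membership plus one closed-form range comprehension per line, with the diagonal start and length computed arithmetically (min of coordinates, n - |r-c|, n - |r+c-(n-1)|).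
-- intended difference: For cells just outside the board whose backward-adjacent cell in some direction is on the board (r=n, c=n or c=-1 with the other coordinate in range), A returns a full board line that does not pass through (r,c), an artefact of its backward stepping; B returns four empty lines, the intended answer since no board line passes through an off-board cell. — e.g. on lines_through_cell(2, 0, 2): A returns [[(0, 0), (0, 1)], [], [], []], B returns [[], [], [], []]
import Mathlib
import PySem

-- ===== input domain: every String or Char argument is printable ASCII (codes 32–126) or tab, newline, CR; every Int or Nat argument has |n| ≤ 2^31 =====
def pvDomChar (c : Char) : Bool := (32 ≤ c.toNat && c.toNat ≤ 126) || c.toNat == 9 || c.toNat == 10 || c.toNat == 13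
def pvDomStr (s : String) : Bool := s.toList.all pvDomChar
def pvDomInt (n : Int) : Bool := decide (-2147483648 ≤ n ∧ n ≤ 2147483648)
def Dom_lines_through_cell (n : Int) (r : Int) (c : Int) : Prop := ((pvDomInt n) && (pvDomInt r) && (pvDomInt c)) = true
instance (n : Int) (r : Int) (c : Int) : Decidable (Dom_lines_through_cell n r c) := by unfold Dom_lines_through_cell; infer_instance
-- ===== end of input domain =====

-- B replaces A's backward-stepping/collecting while-loop pairs by per-direction closed-form range comprehensions; for off-board cells B returns four empty lines (see D_ below).

-- ===== PORT A =====
def in_bounds (n : Int) (r : Int) (c : Int) : Bool :=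
  decide (0 ≤ r ∧ r < n ∧ 0 ≤ c ∧ c < n)

-- the four directions of A's literal dirs list
inductive Dir | h | v | d | a
deriving DecidableEq, Repr

def Dir.dr : Dir → Int | .h => 0 | .v => 1 | .d => 1 | .a => 1
def Dir.dc : Dir → Int | .h => 1 | .v => 0 | .d => 1 | .a => -1

-- A's first while loop: step backwards to the start of the line
def back (dir : Dir) (n : Int) (rr : Int) (cc : Int) : Int × Int :=
  if in_bounds n (rr - dir.dr) (cc - dir.dc) = true then
    back dir n (rr - dir.dr) (cc - dir.dc)
  else (rr, cc)
termination_by (match dir with | .h => cc | _ => rr).toNat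
decreasing_by cases dir <;> simp [in_bounds, Dir.dr, Dir.dc] at * <;> omega

-- A's second while loop: collect the line forwards
def fwd (dir : Dir) (n : Int) (rr : Int) (cc : Int) : List (Int × Int) :=
  if in_bounds n rr cc = true then
    (rr, cc) :: fwd dir n (rr + dir.dr) (cc + dir.dc)
  else []
termination_by (match dir with | .h => n - cc | _ => n - rr).toNat
decreasing_by cases dir <;> simp [in_bounds, Dir.dr, Dir.dc] at * <;> omega

def lines_through_cell (n : Int) (r : Int) (c : Int) : List (List (Int × Int)) :=
  [Dir.h, Dir.v, Dir.d, Dir.a].map (fun dir =>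
    let p := back dir n r c
    fwd dir n p.1 p.2)

-- ===== PORT B =====
-- Source B: off-board cells lie on no line; otherwise four range comprehensions with arithmetic starts/lengths
def lines_through_cell_alt (n : Int) (r : Int) (c : Int) : List (List (Int × Int)) :=
  if 0 ≤ r ∧ r < n ∧ 0 ≤ c ∧ c < n then
    let d := min r c
    let a := min r (n - 1 - c)
    [ (PySem.List.pyRange 0 n 1).map (fun j => (r, j)),
      (PySem.List.pyRange 0 n 1).map (fun i => (i, c)),
      (PySem.List.pyRange 0 (n - |r - c|) 1).map (fun t => (r - d + t, c - d + t)),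
      (PySem.List.pyRange 0 (n - |r + c - (n - 1)|) 1).map (fun t => (r - a + t, c + a - t)) ]
  else [[], [], [], []]

-- ===== PRECONDITION & SPEC =====
-- For cells just outside the board whose backward-adjacent cell in some direction is on the board,
-- A returns a board line not passing through (r,c) (an artefact of its backward stepping); B returns
-- four empty lines, the intended answer for an off-board cell.
def D_lines_through_cell (n : Int) (r : Int) (c : Int) : Prop :=
  ¬ (0 ≤ r ∧ r < n ∧ 0 ≤ c ∧ c < n) ∧
  ((0 ≤ r ∧ r < n ∧ 1 ≤ c ∧ c ≤ n) ∨ (1 ≤ r ∧ r ≤ n ∧ 0 ≤ c ∧ c < n) ∨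
   (1 ≤ r ∧ r ≤ n ∧ 1 ≤ c ∧ c ≤ n) ∨ (1 ≤ r ∧ r ≤ n ∧ -1 ≤ c ∧ c ≤ n - 2))
instance (n : Int) (r : Int) (c : Int) : Decidable (D_lines_through_cell n r c) := by
  unfold D_lines_through_cell; infer_instance

def Spec_lines_through_cell (n : Int) (r : Int) (c : Int) (out : List (List (Int × Int))) : Prop :=
  ¬ D_lines_through_cell n r c → out = lines_through_cell_alt n r c
instance (n : Int) (r : Int) (c : Int) (out : List (List (Int × Int))) : Decidable (Spec_lines_through_cell n r c out) := by
  unfold Spec_lines_through_cell; infer_instance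

def pvDiffWitness_lines_through_cell : Int × Int × Int := (2, 0, 2)
def pvDiffWitnessOut_lines_through_cell : (List (List (Int × Int))) × (List (List (Int × Int))) :=
  ([[(0, 0), (0, 1)], [], [], []], [[], [], [], []])

-- ===== CLAIM (what is proved, stated in full; the proofs are below) =====
def Claim_unchanged_lines_through_cell : Prop := ∀ (n : Int) (r : Int) (c : Int), Dom_lines_through_cell n r c → Spec_lines_through_cell n r c (lines_through_cell n r c)
def Claim_changed_lines_through_cell : Prop := Dom_lines_through_cell (pvDiffWitness_lines_through_cell.1) (pvDiffWitness_lines_through_cell.2.1) (pvDiffWitness_lines_through_cell.2.2) ∧ D_lines_through_cell (pvDiffWitness_lines_through_cell.1) (pvDiffWitness_lines_through_cell.2.1) (pvDiffWitness_lines_through_cell.2.2) ∧ lines_through_cell (pvDiffWitness_lines_through_cell.1) (pvDiffWitness_lines_through_cell.2.1) (pvDiffWitness_lines_through_cell.2.2) = pvDiffWitnessOut_lines_through_cell.1 ∧ lines_through_cell_alt (pvDiffWitness_lines_through_cell.1) (pvDiffWitness_lines_through_cell.2.1) (pvDiffWitness_lines_through_cell.2.2) = pvDiffWitnessOut_lines_through_cell.2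 ∧ pvDiffWitnessOut_lines_through_cell.1 ≠ pvDiffWitnessOut_lines_through_cell.2
def Claim_exact_lines_through_cell : Prop := ∀ (n : Int) (r : Int) (c : Int), Dom_lines_through_cell n r c → D_lines_through_cell n r c → lines_through_cell n r c ≠ lines_through_cell_alt n r c

-- ===== LEMMAS AND PROOFS =====

theorem back_stop (dir : Dir) (n rr cc : Int)
    (h : ¬ in_bounds n (rr - dir.dr) (cc - dir.dc) = true) :
    back dir n rr cc = (rr, cc) := by
  rw [back]; simp [h]

theorem fwd_stop (dir : Dir) (n rr cc : Int)
    (h : ¬ in_bounds n rr cc = true) :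
    fwd dir n rr cc = [] := by
  rw [fwd]; simp [h]

-- backward-loop characterisations (fuel induction on the decreasing coordinate)
theorem back_h_aux (n : Int) : ∀ (m : Nat) (r c : Int), c.toNat ≤ m →
    0 ≤ r → r < n → 1 ≤ c → c - 1 < n → back Dir.h n r c = (r, 0) := by
  intro m
  induction m with
  | zero => intro r c hm h1 h2 h3 h4; omega
  | succ m ih =>
    intro r c hm h1 h2 h3 h4
    rw [back]
    have hc : in_bounds n (r - Dir.h.dr) (c - Dir.h.dc) = true := by
      simp [in_bounds, Dir.dr, Dir.dc]; omega
    rw [if_pos hc]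
    simp only [Dir.dr, Dir.dc, sub_zero]
    by_cases h5 : 1 ≤ c - 1
    · exact ih r (c - 1) (by omega) h1 h2 h5 (by omega)
    · have : c - 1 = 0 := by omega
      rw [this, back_stop]
      simp [in_bounds, Dir.dr, Dir.dc]

theorem back_v_aux (n : Int) : ∀ (m : Nat) (r c : Int), r.toNat ≤ m →
    1 ≤ r → r - 1 < n → 0 ≤ c → c < n → back Dir.v n r c = (0, c) := by
  intro m
  induction m with
  | zero => intro r c hm h1 h2 h3 h4; omega
  | succ m ih =>
    intro r c hm h1 h2 h3 h4
    rw [back]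
    have hc : in_bounds n (r - Dir.v.dr) (c - Dir.v.dc) = true := by
      simp [in_bounds, Dir.dr, Dir.dc]; omega
    rw [if_pos hc]
    simp only [Dir.dr, Dir.dc, sub_zero]
    by_cases h5 : 1 ≤ r - 1
    · exact ih (r - 1) c (by omega) h5 (by omega) h3 h4
    · have : r - 1 = 0 := by omega
      rw [this, back_stop]
      simp [in_bounds, Dir.dr, Dir.dc]

theorem back_d_aux (n : Int) : ∀ (m : Nat) (r c : Int), r.toNat ≤ m →
    1 ≤ r → r - 1 < n → 1 ≤ c → c - 1 < n →
    back Dir.d n r c = (r - min r c, c - min r c) := by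
  intro m
  induction m with
  | zero => intro r c hm h1 h2 h3 h4; omega
  | succ m ih =>
    intro r c hm h1 h2 h3 h4
    rw [back]
    have hc : in_bounds n (r - Dir.d.dr) (c - Dir.d.dc) = true := by
      simp [in_bounds, Dir.dr, Dir.dc]; omega
    rw [if_pos hc]
    simp only [Dir.dr, Dir.dc]
    by_cases h5 : 1 ≤ r - 1 ∧ 1 ≤ c - 1
    · rw [ih (r - 1) (c - 1) (by omega) h5.1 (by omega) h5.2 (by omega)]
      have e1 : r - 1 - min (r - 1) (c - 1) = r - min r c := by omega
      have e2 : c - 1 - min (r - 1) (c - 1) = c - min r c := by omega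
      rw [e1, e2]
    · rw [back_stop]
      · have e1 : r - 1 = r - min r c := by omega
        have e2 : c - 1 = c - min r c := by omega
        rw [e1, e2]
      · simp [in_bounds, Dir.dr, Dir.dc]; omega

theorem back_a_aux (n : Int) : ∀ (m : Nat) (r c : Int), r.toNat ≤ m →
    1 ≤ r → r - 1 < n → 0 ≤ c + 1 → c + 1 < n →
    back Dir.a n r c = (r - min r (n - 1 - c), c + min r (n - 1 - c)) := by
  intro m
  induction m with
  | zero => intro r c hm h1 h2 h3 h4; omega
  | succ m ih =>
    intro r c hm h1 h2 h3 h4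
    rw [back]
    have hc : in_bounds n (r - Dir.a.dr) (c - Dir.a.dc) = true := by
      simp [in_bounds, Dir.dr, Dir.dc]; omega
    rw [if_pos hc]
    simp only [Dir.dr, Dir.dc, sub_neg_eq_add]
    by_cases h5 : 1 ≤ r - 1 ∧ c + 1 + 1 < n
    · rw [ih (r - 1) (c + 1) (by omega) h5.1 (by omega) (by omega) h5.2]
      have e1 : r - 1 - min (r - 1) (n - 1 - (c + 1)) = r - min r (n - 1 - c) := by omega
      have e2 : c + 1 + min (r - 1) (n - 1 - (c + 1)) = c + min r (n - 1 - c) := by omega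
      rw [e1, e2]
    · rw [back_stop]
      · have e1 : r - 1 = r - min r (n - 1 - c) := by omega
        have e2 : c + 1 = c + min r (n - 1 - c) := by omega
        rw [e1, e2]
      · simp [in_bounds, Dir.dr, Dir.dc]; omega

-- forward-loop characterisations (fuel induction)
theorem fwd_h_aux (n : Int) : ∀ (m : Nat) (r c : Int), (n - c).toNat ≤ m →
    0 ≤ r → r < n → 0 ≤ c → c < n →
    fwd Dir.h n r c = (List.range (n - c).toNat).map (fun (k : Nat) => (r, c + (k : Int))) := by
  intro m
  induction m with
  | zero => intro r c hm h1 h2 h3 h4; omega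
  | succ m ih =>
    intro r c hm h1 h2 h3 h4
    rw [fwd]
    have hc : in_bounds n r c = true := by simp [in_bounds]; omega
    rw [if_pos hc]
    simp only [Dir.dr, Dir.dc, add_zero]
    have hcnt : (n - c).toNat = (n - (c + 1)).toNat + 1 := by omega
    by_cases h5 : c + 1 < n
    · rw [ih r (c + 1) (by omega) h1 h2 (by omega) h5]
      rw [hcnt, List.range_succ_eq_map, List.map_cons, List.map_map]
      refine congrArg₂ _ (by simp) ?_
      apply List.map_congr_left
      intro k _
      simp only [Function.comp_apply]
      refine congrArg₂ _ rfl ?_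
      push_cast; ring
    · rw [fwd_stop]
      · have : (n - c).toNat = 1 := by omega
        rw [this]
        simp
      · simp [in_bounds]; omega

theorem fwd_v_aux (n : Int) : ∀ (m : Nat) (r c : Int), (n - r).toNat ≤ m →
    0 ≤ r → r < n → 0 ≤ c → c < n →
    fwd Dir.v n r c = (List.range (n - r).toNat).map (fun (k : Nat) => (r + (k : Int), c)) := by
  intro m
  induction m with
  | zero => intro r c hm h1 h2 h3 h4; omega
  | succ m ih =>
    intro r c hm h1 h2 h3 h4
    rw [fwd]
    have hc : in_bounds n r c = true := by simp [in_bounds]; omega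
    rw [if_pos hc]
    simp only [Dir.dr, Dir.dc, add_zero]
    have hcnt : (n - r).toNat = (n - (r + 1)).toNat + 1 := by omega
    by_cases h5 : r + 1 < n
    · rw [ih (r + 1) c (by omega) (by omega) h5 h3 h4]
      rw [hcnt, List.range_succ_eq_map, List.map_cons, List.map_map]
      refine congrArg₂ _ (by simp) ?_
      apply List.map_congr_left
      intro k _
      simp only [Function.comp_apply]
      refine congrArg₂ _ ?_ rfl
      push_cast; ring
    · rw [fwd_stop]
      · have : (n - r).toNat = 1 := by omega
        rw [this]
        simp
      · simp [in_bounds]; omega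

theorem fwd_d_aux (n : Int) : ∀ (m : Nat) (r c : Int), (n - r).toNat ≤ m →
    0 ≤ r → r < n → 0 ≤ c → c < n →
    fwd Dir.d n r c = (List.range (min (n - r) (n - c)).toNat).map
      (fun (k : Nat) => (r + (k : Int), c + (k : Int))) := by
  intro m
  induction m with
  | zero => intro r c hm h1 h2 h3 h4; omega
  | succ m ih =>
    intro r c hm h1 h2 h3 h4
    rw [fwd]
    have hc : in_bounds n r c = true := by simp [in_bounds]; omega
    rw [if_pos hc]
    simp only [Dir.dr, Dir.dc]
    have hcnt : (min (n - r) (n - c)).toNat = (min (n - (r + 1)) (n - (c + 1))).toNat + 1 := by omega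
    by_cases h5 : r + 1 < n ∧ c + 1 < n
    · rw [ih (r + 1) (c + 1) (by omega) (by omega) h5.1 (by omega) h5.2]
      rw [hcnt, List.range_succ_eq_map, List.map_cons, List.map_map]
      refine congrArg₂ _ (by simp) ?_
      apply List.map_congr_left
      intro k _
      simp only [Function.comp_apply]
      refine congrArg₂ _ ?_ ?_ <;> (push_cast; ring)
    · rw [fwd_stop]
      · have : (min (n - r) (n - c)).toNat = 1 := by omega
        rw [this]
        simp
      · simp [in_bounds]; omega

theorem fwd_a_aux (n : Int) : ∀ (m : Nat) (r c : Int), (n - r).toNat ≤ m →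
    0 ≤ r → r < n → 0 ≤ c → c < n →
    fwd Dir.a n r c = (List.range (min (n - r) (c + 1)).toNat).map
      (fun (k : Nat) => (r + (k : Int), c - (k : Int))) := by
  intro m
  induction m with
  | zero => intro r c hm h1 h2 h3 h4; omega
  | succ m ih =>
    intro r c hm h1 h2 h3 h4
    rw [fwd]
    have hc : in_bounds n r c = true := by simp [in_bounds]; omega
    rw [if_pos hc]
    have ecc : c + Dir.a.dc = c - 1 := by simp [Dir.dc]; ring
    rw [ecc]
    simp only [Dir.dr]
    have hcnt : (min (n - r) (c + 1)).toNat = (min (n - (r + 1)) ((c - 1) + 1)).toNat + 1 := by omega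
    by_cases h5 : r + 1 < n ∧ 0 ≤ c - 1
    · rw [ih (r + 1) (c - 1) (by omega) (by omega) h5.1 h5.2 (by omega)]
      rw [hcnt, List.range_succ_eq_map, List.map_cons, List.map_map]
      refine congrArg₂ _ (by simp) ?_
      apply List.map_congr_left
      intro k _
      simp only [Function.comp_apply]
      refine congrArg₂ _ ?_ ?_ <;> (push_cast; ring)
    · rw [fwd_stop]
      · have : (min (n - r) (c + 1)).toNat = 1 := by omega
        rw [this]
        simp
      · simp [in_bounds]; omega

-- generic finisher for maps over equal ranges
theorem map_range_eq {α : Type} (M N : Nat) (f g : Nat → α) (hMN : M = N)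
    (h : ∀ k, f k = g k) : (List.range M).map f = (List.range N).map g := by
  subst hMN
  exact List.map_congr_left (fun k _ => h k)

-- composition lemmas: one A line = one B comprehension, for an on-board cell
theorem comp_h (n r c : Int) (hr0 : 0 ≤ r) (hrn : r < n) (hc0 : 0 ≤ c) (hcn : c < n) :
    fwd Dir.h n (back Dir.h n r c).1 (back Dir.h n r c).2 =
      (PySem.List.pyRange 0 n 1).map (fun j => (r, j)) := by
  have hb : back Dir.h n r c = (r, 0) := by
    by_cases h1 : 1 ≤ c
    · exact back_h_aux n c.toNat r c le_rfl hr0 hrn h1 (by omega)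
    · have : c = 0 := by omega
      subst this
      rw [back_stop]
      simp [in_bounds, Dir.dr, Dir.dc]
  rw [hb]
  rw [fwd_h_aux n n.toNat r 0 (by omega) hr0 hrn le_rfl (by omega)]
  rw [PySem.List.pyRange_one, List.map_map]
  exact map_range_eq _ _ _ _ (by omega)
    (fun k => by simp)

theorem comp_v (n r c : Int) (hr0 : 0 ≤ r) (hrn : r < n) (hc0 : 0 ≤ c) (hcn : c < n) :
    fwd Dir.v n (back Dir.v n r c).1 (back Dir.v n r c).2 =
      (PySem.List.pyRange 0 n 1).map (fun i => (i, c)) := by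
  have hb : back Dir.v n r c = (0, c) := by
    by_cases h1 : 1 ≤ r
    · exact back_v_aux n r.toNat r c le_rfl h1 (by omega) hc0 hcn
    · have : r = 0 := by omega
      subst this
      rw [back_stop]
      simp [in_bounds, Dir.dr, Dir.dc]
  rw [hb]
  rw [fwd_v_aux n n.toNat 0 c (by omega) le_rfl (by omega) hc0 hcn]
  rw [PySem.List.pyRange_one, List.map_map]
  exact map_range_eq _ _ _ _ (by omega)
    (fun k => by simp)

theorem comp_d (n r c : Int) (hr0 : 0 ≤ r) (hrn : r < n) (hc0 : 0 ≤ c) (hcn : c < n) :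
    fwd Dir.d n (back Dir.d n r c).1 (back Dir.d n r c).2 =
      (PySem.List.pyRange 0 (n - |r - c|) 1).map
        (fun t => (r - min r c + t, c - min r c + t)) := by
  have hb : back Dir.d n r c = (r - min r c, c - min r c) := by
    by_cases h1 : 1 ≤ r ∧ 1 ≤ c
    · exact back_d_aux n r.toNat r c le_rfl h1.1 (by omega) h1.2 (by omega)
    · rw [back_stop]
      · have h0 : min r c = 0 := by omega
        rw [h0]; norm_num
      · simp [in_bounds, Dir.dr, Dir.dc]; omega
  rw [hb]
  rw [fwd_d_aux n n.toNat (r - min r c) (c - min r c) (by omega) (by omega) (by omega)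
    (by omega) (by omega)]
  rw [PySem.List.pyRange_one, List.map_map]
  have habs : n - |r - c| = min (n - (r - min r c)) (n - (c - min r c)) := by
    rcases abs_cases (r - c) with ⟨h1, h2⟩ | ⟨h1, h2⟩ <;> rw [h1] <;> omega
  exact map_range_eq _ _ _ _ (by rw [habs]; omega) (fun k => by simp)

theorem comp_a (n r c : Int) (hr0 : 0 ≤ r) (hrn : r < n) (hc0 : 0 ≤ c) (hcn : c < n) :
    fwd Dir.a n (back Dir.a n r c).1 (back Dir.a n r c).2 =
      (PySem.List.pyRange 0 (n - |r + c - (n - 1)|) 1).map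
        (fun t => (r - min r (n - 1 - c) + t, c + min r (n - 1 - c) - t)) := by
  have hb : back Dir.a n r c = (r - min r (n - 1 - c), c + min r (n - 1 - c)) := by
    by_cases h1 : 1 ≤ r ∧ c + 1 < n
    · exact back_a_aux n r.toNat r c le_rfl h1.1 (by omega) (by omega) h1.2
    · rw [back_stop]
      · have h0 : min r (n - 1 - c) = 0 := by omega
        rw [h0]; norm_num
      · simp [in_bounds, Dir.dr, Dir.dc]; omega
  rw [hb]
  rw [fwd_a_aux n n.toNat (r - min r (n - 1 - c)) (c + min r (n - 1 - c)) (by omega) (by omega)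
    (by omega) (by omega) (by omega)]
  rw [PySem.List.pyRange_one, List.map_map]
  have habs : n - |r + c - (n - 1)| =
      min (n - (r - min r (n - 1 - c))) (c + min r (n - 1 - c) + 1) := by
    rcases abs_cases (r + c - (n - 1)) with ⟨h1, h2⟩ | ⟨h1, h2⟩ <;> rw [h1] <;> omega
  exact map_range_eq _ _ _ _ (by rw [habs]; omega) (fun k => by simp)

-- off the board with no backward-adjacent on-board cell: every A line is empty
theorem A_empty (n r c : Int) (hout : ¬ (0 ≤ r ∧ r < n ∧ 0 ≤ c ∧ c < n))
    (hD : ¬ D_lines_through_cell n r c) :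
    lines_through_cell n r c = [[], [], [], []] := by
  have hd : ¬ ((0 ≤ r ∧ r < n ∧ 1 ≤ c ∧ c ≤ n) ∨ (1 ≤ r ∧ r ≤ n ∧ 0 ≤ c ∧ c < n) ∨
      (1 ≤ r ∧ r ≤ n ∧ 1 ≤ c ∧ c ≤ n) ∨ (1 ≤ r ∧ r ≤ n ∧ -1 ≤ c ∧ c ≤ n - 2)) := by
    intro h
    exact hD ⟨hout, h⟩
  simp only [lines_through_cell, List.map_cons, List.map_nil]
  have bh : back Dir.h n r c = (r, c) := by
    rw [back_stop]; simp [in_bounds, Dir.dr, Dir.dc]; omega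
  have bv : back Dir.v n r c = (r, c) := by
    rw [back_stop]; simp [in_bounds, Dir.dr, Dir.dc]; omega
  have bd : back Dir.d n r c = (r, c) := by
    rw [back_stop]; simp [in_bounds, Dir.dr, Dir.dc]; omega
  have ba : back Dir.a n r c = (r, c) := by
    rw [back_stop]; simp [in_bounds, Dir.dr, Dir.dc]; omega
  rw [bh, bv, bd, ba]
  have hf : ∀ dir : Dir, fwd dir n r c = [] := fun dir => by
    rw [fwd_stop]; simp [in_bounds]; omega
  simp [hf]

-- helpers for the tight claim: A yields a nonempty line whenever back can take a step
theorem fwd_ne_nil (dir : Dir) (n rr cc : Int) (h : in_bounds n rr cc = true) :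
    fwd dir n rr cc ≠ [] := by
  rw [fwd, if_pos h]; simp

theorem back_mem (dir : Dir) (n rr cc : Int) (h : in_bounds n rr cc = true) :
    in_bounds n (back dir n rr cc).1 (back dir n rr cc).2 = true := by
  rw [back]
  split
  · exact back_mem dir n (rr - dir.dr) (cc - dir.dc) (by assumption)
  · exact h
termination_by (match dir with | .h => cc | _ => rr).toNat
decreasing_by cases dir <;> simp [in_bounds, Dir.dr, Dir.dc] at * <;> omega

theorem A_line_ne_nil (dir : Dir) (n r c : Int)
    (h : in_bounds n (r - dir.dr) (c - dir.dc) = true) :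
    fwd dir n (back dir n r c).1 (back dir n r c).2 ≠ [] := by
  have hb : back dir n r c = back dir n (r - dir.dr) (c - dir.dc) := by
    rw [back, if_pos h]
  rw [hb]
  exact fwd_ne_nil dir n _ _ (back_mem dir n _ _ h)

-- ===== VERDICT (by name: the statement is the Claim_ definition above) =====
theorem lines_through_cell_spec : Claim_unchanged_lines_through_cell := by
  intro n r c _ hD
  show lines_through_cell n r c = lines_through_cell_alt n r c
  by_cases hin : 0 ≤ r ∧ r < n ∧ 0 ≤ c ∧ c < n
  · obtain ⟨h1, h2, h3, h4⟩ := hin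
    rw [lines_through_cell_alt, if_pos ⟨h1, h2, h3, h4⟩]
    simp only [lines_through_cell, List.map_cons, List.map_nil]
    rw [comp_h n r c h1 h2 h3 h4, comp_v n r c h1 h2 h3 h4,
        comp_d n r c h1 h2 h3 h4, comp_a n r c h1 h2 h3 h4]
  · rw [lines_through_cell_alt, if_neg hin, A_empty n r c hin hD]

theorem lines_through_cell_changed : Claim_changed_lines_through_cell := by
  unfold Claim_changed_lines_through_cell
  refine ⟨by decide, by decide, ?_, by decide, by decide⟩
  have bh : back Dir.h 2 0 2 = (0, 0) := by
    rw [back, if_pos (by decide)]; norm_num [Dir.dr, Dir.dc]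
    rw [back, if_pos (by decide)]; norm_num [Dir.dr, Dir.dc]
    rw [back, if_neg (by decide)]
  have bv : back Dir.v 2 0 2 = (0, 2) := by rw [back, if_neg (by decide)]
  have bd : back Dir.d 2 0 2 = (0, 2) := by rw [back, if_neg (by decide)]
  have ba : back Dir.a 2 0 2 = (0, 2) := by rw [back, if_neg (by decide)]
  have f2 : fwd Dir.h 2 0 2 = [] := by rw [fwd, if_neg (by decide)]
  have f1 : fwd Dir.h 2 0 1 = [(0, 1)] := by
    rw [fwd, if_pos (by decide)]; norm_num [Dir.dr, Dir.dc, f2]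
  have f0 : fwd Dir.h 2 0 0 = [(0, 0), (0, 1)] := by
    rw [fwd, if_pos (by decide)]; norm_num [Dir.dr, Dir.dc, f1]
  have fv : fwd Dir.v 2 0 2 = [] := by rw [fwd, if_neg (by decide)]
  have fd : fwd Dir.d 2 0 2 = [] := by rw [fwd, if_neg (by decide)]
  have fa : fwd Dir.a 2 0 2 = [] := by rw [fwd, if_neg (by decide)]
  show lines_through_cell 2 0 2 = [[(0, 0), (0, 1)], [], [], []]
  simp only [lines_through_cell, List.map_cons, List.map_nil]
  simp [bh, bv, bd, ba, f0, fv, fd, fa]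

theorem lines_through_cell_tight : Claim_exact_lines_through_cell := by
  intro n r c _ hD heq
  obtain ⟨hout, hdisj⟩ := hD
  have hB : lines_through_cell_alt n r c = [[], [], [], []] := by
    rw [lines_through_cell_alt, if_neg hout]
  rw [hB] at heq
  simp only [lines_through_cell, List.map_cons, List.map_nil, List.cons.injEq, and_true] at heq
  rcases hdisj with h | h | h | h
  · exact A_line_ne_nil Dir.h n r c (by simp [in_bounds, Dir.dr, Dir.dc]; omega) heq.1
  · exact A_line_ne_nil Dir.v n r c (by simp [in_bounds, Dir.dr, Dir.dc]; omega) heq.2.1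
  · exact A_line_ne_nil Dir.d n r c (by simp [in_bounds, Dir.dr, Dir.dc]; omega) heq.2.2.1
  · exact A_line_ne_nil Dir.a n r c (by simp [in_bounds, Dir.dr, Dir.dc]; omega) heq.2.2.2
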